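-- pv_equiv track=rewrite | github.com/shawkridge/athena | src/athena/symbols/type_inference.py | _extract_method_calls
-- ===== SOURCE A (Python) =====
-- from typing import Dict, List, Optional
--
-- def _extract_method_calls(line: str, param_name: str) -> List[str]:
--     """Extract method names called on a parameter."""
--     methods = []
--     pattern = f"{param_name}."
--
--     if pattern not in line:
--         return methods
--
--     start = line.find(pattern) + len(pattern)
--     # Find method name (until '(' or whitespace)
--     end = start
--     while end < len(line) and line[end] not in ("(", " ", "\n"):
--         end += 1
--
--     if end > start:
--         method = line[start:end]
--         methods.append(method)
--
--     return methods
-- ===== SOURCE B (Python) =====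
-- def _extract_method_calls(line, param_name):
--     """Extract method names called on a parameter."""
--     parts = line.split(param_name + ".", 1)
--     if len(parts) == 1:
--         return []
--     method = parts[1].replace("(", "\n").replace(" ", "\n").split("\n", 1)[0]
--     return [method] if method else []
-- ===== Notes on version B (the rewrite author's own statement) =====
-- stated objective: idiomatic
-- what changed: A's find plus manual index-by-index scan for the end of the method name is replaced by string splitting: split the line once on the pattern, normalise the two other stop characters to newline with replace, and split once more to take the leading piece; no index arithmetic or character walk remains.
import Mathlib
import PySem

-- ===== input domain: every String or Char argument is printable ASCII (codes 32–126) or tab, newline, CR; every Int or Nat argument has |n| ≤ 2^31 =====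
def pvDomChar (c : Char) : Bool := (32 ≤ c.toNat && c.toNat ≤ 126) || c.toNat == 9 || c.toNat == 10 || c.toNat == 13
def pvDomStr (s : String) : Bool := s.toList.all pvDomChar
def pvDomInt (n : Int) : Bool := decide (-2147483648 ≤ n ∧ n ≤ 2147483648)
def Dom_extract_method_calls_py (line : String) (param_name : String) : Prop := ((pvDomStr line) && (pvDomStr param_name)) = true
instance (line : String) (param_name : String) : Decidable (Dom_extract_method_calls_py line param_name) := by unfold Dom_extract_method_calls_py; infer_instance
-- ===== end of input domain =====

-- B replaces A's find + manual index scan by split-on-pattern, replace-normalise the stop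
-- characters, and a second split; same cost, an idiomatic decomposition. Proved equal on all inputs.

-- ===== PORT A =====
-- the while loop: `end` advances while line[end] is none of '(' , ' ', '\n'
def pvScanEnd (l : List Char) (e : Nat) : Nat :=
  if h : e < l.length then
    if l[e] = '(' ∨ l[e] = ' ' ∨ l[e] = '\n' then e else pvScanEnd l (e + 1)
  else e
termination_by l.length - e

def extract_method_calls_py (line : String) (param_name : String) : List String :=
  let methods : List String := []
  let l := line.toList
  let pattern := param_name.toList ++ ['.']            -- f"{param_name}."
  if PySem.Chars.isIn pattern l = false then methods   -- if pattern not in line: return methods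
  else
    let start : Int := PySem.Chars.find l pattern + pattern.length  -- line.find(pattern) + len(pattern)
    let e := pvScanEnd l start.toNat                   -- the while loop (find ≥ 0 in this branch)
    if (e : Int) > start then
      methods ++ [String.ofList (PySem.List.slice l (some start) (some (e : Int)))]  -- line[start:end]
    else methods

-- ===== PORT B =====
def extract_method_calls_py_alt (line : String) (param_name : String) : List String :=
  let l := line.toList
  let parts := PySem.Chars.splitOnMax l (param_name.toList ++ ['.']) 1   -- line.split(param_name + ".", 1); sep ≠ '' since it ends in '.'
  if parts.length = 1 then []                          -- if len(parts) == 1: return []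
  else
    let rest := parts.getD 1 []                        -- parts[1]; always in range here, getD is exact
    let mapped := PySem.Chars.replace (PySem.Chars.replace rest ['('] ['\n']) [' '] ['\n']
    let method := (PySem.Chars.splitOnMax mapped ['\n'] 1).headD []      -- .split("\n", 1)[0]; split is never empty, headD is exact
    if method = [] then [] else [String.ofList method] -- return [method] if method else []

-- ===== PRECONDITION & SPEC =====
def Spec_extract_method_calls_py (line : String) (param_name : String) (out : List String) : Prop := out = extract_method_calls_py_alt line param_name
instance (line : String) (param_name : String) (out : List String) : Decidable (Spec_extract_method_calls_py line param_name out) := by unfold Spec_extract_method_calls_py; infer_instance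

-- ===== CLAIM (what is proved, stated in full; the proofs are below) =====
def Claim_equal_extract_method_calls_py : Prop := ∀ (line : String) (param_name : String), Dom_extract_method_calls_py line param_name → Spec_extract_method_calls_py line param_name (extract_method_calls_py line param_name)

-- ===== LEMMAS AND PROOFS =====

-- "not a stop character": both programs cut the method name at '(' , ' ' or '\n'
def pvKeep (c : Char) : Bool := !(c = '(' ∨ c = ' ' ∨ c = '\n')

-- A's while loop lands right after the longest pvKeep-prefix of the remaining string
theorem pvScanEnd_eq (l : List Char) (e : Nat) :
    pvScanEnd l e = e + ((l.drop e).takeWhile pvKeep).length := by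
  fun_induction pvScanEnd l e with
  | case1 e h hstop =>
    rw [List.drop_eq_getElem_cons h]
    simp [pvKeep, hstop]
  | case2 e h hstop ih =>
    rw [List.drop_eq_getElem_cons h, List.takeWhile_cons]
    have hk : pvKeep l[e] = true := by simp [pvKeep]; tauto
    simp [hk, ih]; omega
  | case3 e h =>
    have : l.drop e = [] := List.drop_eq_nil_of_le (by omega)
    simp [this]

-- a prefix occurrence at index k is an infix occurrence
theorem pvInfix_of_prefix_drop (l pat : List Char) (k : Nat) (h : pat <+: l.drop k) :
    pat <:+: l := by
  rcases h with ⟨t, ht⟩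
  exact ⟨l.take k, t, by rw [List.append_assoc, ht, List.take_append_drop]⟩

-- find returns THE index whose occurrence is first
theorem pvFind_eq_of (l pat : List Char) (k : Nat) (hk : pat <+: l.drop k)
    (hmin : ∀ i, i < k → ¬ pat <+: l.drop i) : PySem.Chars.find l pat = (k : Int) := by
  have hinf : pat <:+: l := pvInfix_of_prefix_drop l pat k hk
  have hnn : 0 ≤ PySem.Chars.find l pat := (PySem.Chars.find_nonneg_iff _ _).mpr hinf
  obtain ⟨hpre, hm⟩ := PySem.Chars.find_spec (s := l) (sub := pat) hnn
  set n := (PySem.Chars.find l pat).toNat with hn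
  have h1 : ¬ n < k := fun hlt => hmin n hlt hpre
  have h2 : ¬ k < n := fun hlt => hm k hlt hk
  omega

-- splitOnMax.go with maxsplit exhausted returns the remainder as the last piece
theorem pvGo_zero (sep : List Char) (fuel : Nat) (l cur : List Char) (accs : List (List Char)) :
    PySem.Chars.splitOnMax.go sep fuel 0 l cur accs = accs.reverse ++ [cur.reverse ++ l] := by
  cases fuel with
  | zero => simp [PySem.Chars.splitOnMax.go]
  | succ f =>
    cases l with
    | nil => simp [PySem.Chars.splitOnMax.go]
    | cons c t => simp [PySem.Chars.splitOnMax.go]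

-- the characterisation of s.split(sep, 1) for nonempty sep
theorem pvGo_one (sep : List Char) (hs : sep ≠ []) (fuel : Nat) :
    ∀ (l cur : List Char) (accs : List (List Char)), l.length ≤ fuel →
    PySem.Chars.splitOnMax.go sep fuel 1 l cur accs =
      if sep <:+: l then
        accs.reverse ++ [cur.reverse ++ l.take (PySem.Chars.find l sep).toNat,
          l.drop ((PySem.Chars.find l sep).toNat + sep.length)]
      else accs.reverse ++ [cur.reverse ++ l] := by
  induction fuel with
  | zero =>
    intro l cur accs hlen
    have : l = [] := List.eq_nil_of_length_eq_zero (by omega)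
    subst this
    have : ¬ sep <:+: ([] : List Char) := by
      simp [List.infix_nil]; exact hs
    simp [PySem.Chars.splitOnMax.go, this]
  | succ f ih =>
    intro l cur accs hlen
    cases l with
    | nil =>
      have : ¬ sep <:+: ([] : List Char) := by simp [List.infix_nil]; exact hs
      simp [PySem.Chars.splitOnMax.go, this]
    | cons c t =>
      by_cases hpre : sep.isPrefixOf (c :: t) = true
      · have hp : sep <+: (c :: t) := List.isPrefixOf_iff_prefix.mp hpre
        have hfind : PySem.Chars.find (c :: t) sep = 0 :=
          pvFind_eq_of _ _ 0 (by simpa using hp) (by omega)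
        have hinf : sep <:+: (c :: t) := hp.isInfix
        simp only [PySem.Chars.splitOnMax.go, hpre, if_true, if_neg (by omega : ¬ (1:Nat) = 0)]
        rw [pvGo_zero]
        simp [hinf, hfind]
      · have hnp : ¬ sep <+: (c :: t) := fun h => hpre (List.isPrefixOf_iff_prefix.mpr h)
        have hlen' : t.length ≤ f := by simpa using hlen
        simp only [PySem.Chars.splitOnMax.go, hpre, if_neg (by omega : ¬ (1:Nat) = 0)]
        rw [ih t (c :: cur) accs hlen']
        have hiff : sep <:+: (c :: t) ↔ sep <:+: t := by
          constructor
          · rintro ⟨s, u, hsu⟩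
            cases s with
            | nil => exact absurd ⟨u, by simpa using hsu⟩ hnp
            | cons a s' =>
              refine ⟨s', u, ?_⟩
              simpa using congrArg List.tail hsu
          · exact fun h => h.trans (List.suffix_cons c t).isInfix
        by_cases hinf : sep <:+: t
        · have hfind : 0 ≤ PySem.Chars.find t sep := (PySem.Chars.find_nonneg_iff _ _).mpr hinf
          obtain ⟨hpre2, hm2⟩ := PySem.Chars.find_spec (s := t) (sub := sep) hfind
          set m := (PySem.Chars.find t sep).toNat with hm
          have hfc : PySem.Chars.find (c :: t) sep = ((m + 1 : Nat) : Int) := by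
            refine pvFind_eq_of _ _ (m + 1) (by simpa using hpre2) ?_
            intro i hi
            cases i with
            | zero => simpa using hnp
            | succ j => intro h; exact hm2 j (by omega) (by simpa using h)
          rw [if_pos (hiff.mpr hinf), if_pos hinf, hfc]
          have hd : m + 1 + sep.length = (m + sep.length) + 1 := by omega
          simp [List.take_succ_cons, hd, List.drop_succ_cons]
        · rw [if_neg (fun h => hinf (hiff.mp h)), if_neg hinf]
          simp

theorem pvSplitOne (l sep : List Char) (hs : sep ≠ []) :
    PySem.Chars.splitOnMax l sep 1 =
      if sep <:+: l then
        [l.take (PySem.Chars.find l sep).toNat,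
         l.drop ((PySem.Chars.find l sep).toNat + sep.length)]
      else [l] := by
  rw [PySem.Chars.splitOnMax, if_neg (by omega : ¬ (1:Int) < 0)]
  simp only [Int.toNat_one]
  rw [pvGo_one sep hs (l.length + 1) l [] [] (by omega)]
  split_ifs <;> simp

-- single-character replace is a character map
theorem pvReplaceGo (a b : Char) (fuel : Nat) :
    ∀ (l acc : List Char), l.length ≤ fuel →
    PySem.Chars.replace.go [a] [b] fuel l acc =
      acc.reverse ++ l.map (fun c => if c = a then b else c) := by
  induction fuel with
  | zero =>
    intro l acc hlen
    have : l = [] := List.eq_nil_of_length_eq_zero (by omega)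
    subst this; simp [PySem.Chars.replace.go]
  | succ f ih =>
    intro l acc hlen
    cases l with
    | nil => simp [PySem.Chars.replace.go]
    | cons c t =>
      have hlen' : t.length ≤ f := by simpa using hlen
      by_cases hc : c = a
      · have hpre : List.isPrefixOf [a] (c :: t) = true := by simp [List.isPrefixOf, hc]
        simp only [PySem.Chars.replace.go, hpre, if_true]
        rw [show List.drop [a].length (c :: t) = t from rfl,
            show [b].reverse ++ acc = b :: acc from rfl, ih t (b :: acc) hlen']
        simp [hc]
      · have hpre : List.isPrefixOf [a] (c :: t) = false := by
          simp [List.isPrefixOf]; exact fun h => hc h.symm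
        simp only [PySem.Chars.replace.go, hpre]
        rw [if_neg (by simp), ih t (c :: acc) hlen']
        simp [hc]

theorem pvReplace_single (s : List Char) (a b : Char) :
    PySem.Chars.replace s [a] [b] = s.map (fun c => if c = a then b else c) := by
  rw [PySem.Chars.replace, if_neg (by simp), pvReplaceGo a b s.length s [] (le_refl _)]
  simp

-- take up to the first occurrence of a character = takeWhile (· ≠ c)
theorem pvTakeIdx (cs : List Char) (c : Char) (hmem : c ∈ cs) :
    cs.take (PySem.Chars.find cs [c]).toNat = cs.takeWhile (fun x => !(x == c)) := by
  induction cs with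
  | nil => simp at hmem
  | cons a t ih =>
    by_cases hac : a = c
    · subst hac
      have h0 : PySem.Chars.find (a :: t) [a] = 0 :=
        pvFind_eq_of _ _ 0 (by simp) (by omega)
      simp [h0]
    · have hmt : c ∈ t := by
        rcases List.mem_cons.mp hmem with h | h
        · exact absurd h.symm hac
        · exact h
      have hinf : [c] <:+: t := (List.singleton_infix_iff c t).mpr hmt
      have hnn : 0 ≤ PySem.Chars.find t [c] := (PySem.Chars.find_nonneg_iff _ _).mpr hinf
      obtain ⟨hpre2, hm2⟩ := PySem.Chars.find_spec (s := t) (sub := [c]) hnn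
      set m := (PySem.Chars.find t [c]).toNat with hm
      have : PySem.Chars.find (a :: t) [c] = ((m + 1 : Nat) : Int) := by
        refine pvFind_eq_of _ _ (m + 1) (by simpa using hpre2) ?_
        intro i hi
        cases i with
        | zero => simp [List.prefix_cons_iff]; exact fun h => hac h.symm
        | succ j => intro h; exact hm2 j (by omega) (by simpa using h)
      rw [this]
      simp only [Int.toNat_natCast, List.take_succ_cons, List.takeWhile_cons]
      rw [if_pos (by simp [hac]), ih hmt]

-- the stop-character normalisation map
def pvNorm (c : Char) : Char :=
  if (if c = '(' then '\n' else c) = ' ' then '\n' else (if c = '(' then '\n' else c)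

theorem pvMapId (xs : List Char) (h : ∀ c ∈ xs, pvKeep c = true) : xs.map pvNorm = xs := by
  induction xs with
  | nil => rfl
  | cons a t ih =>
    have ha := h a (by simp)
    have ht := fun c hc => h c (List.mem_cons_of_mem a hc)
    have hna : pvNorm a = a := by
      simp only [pvKeep] at ha
      have h3 : ¬(a = '(' ∨ a = ' ' ∨ a = '\n') := by simpa using ha
      simp only [pvNorm]
      split_ifs with h1 h2 <;> simp_all
    simp [hna, ih ht]

theorem pvHead_split_norm (rest : List Char) :
    (PySem.Chars.splitOnMax (rest.map pvNorm) ['\n'] 1).headD [] = rest.takeWhile pvKeep := by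
  rw [pvSplitOne _ _ (by simp)]
  have hmapTW : (rest.map pvNorm).takeWhile (fun x => !(x == '\n'))
      = (rest.takeWhile pvKeep).map pvNorm := by
    rw [List.takeWhile_map]
    have hfun : ((fun x => !(x == '\n')) ∘ pvNorm) = pvKeep := by
      funext c
      simp only [Function.comp, pvNorm, pvKeep]
      by_cases h1 : c = '(' <;> by_cases h2 : c = ' ' <;> by_cases h3 : c = '\n' <;>
        simp [h1, h2, h3]
    rw [hfun]
  have hmapId : (rest.takeWhile pvKeep).map pvNorm = rest.takeWhile pvKeep :=
    pvMapId _ (fun c hc => List.mem_takeWhile_imp hc)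
  by_cases hmem : '\n' ∈ rest.map pvNorm
  · rw [if_pos ((List.singleton_infix_iff _ _).mpr hmem)]
    simp only [List.headD_cons]
    rw [pvTakeIdx _ _ hmem, hmapTW, hmapId]
  · have hall : ∀ c ∈ rest, pvKeep c = true := by
      intro c hc
      by_contra hk
      apply hmem
      refine List.mem_map.mpr ⟨c, hc, ?_⟩
      have hk' : c = '(' ∨ c = ' ' ∨ c = '\n' := by
        by_contra hno
        exact hk (by simpa [pvKeep] using hno)
      rcases hk' with h | h | h <;> simp [pvNorm, h]
    rw [if_neg (fun h => hmem ((List.singleton_infix_iff _ _).mp h))]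
    simp only [List.headD_cons]
    rw [List.takeWhile_eq_self_iff.mpr hall, pvMapId rest hall]

theorem pvClamp (n : Nat) (a : Int) (ha : 0 ≤ a) : PySem.List.clampIdx n a = min a.toNat n := by
  simp [PySem.List.clampIdx]; omega

theorem pvSliceAB {α : Type} (l : List α) (a b : Int) (h0 : 0 ≤ a) (hab : a ≤ b)
    (hb : b.toNat ≤ l.length) :
    PySem.List.slice l (some a) (some b) = (l.drop a.toNat).take (b.toNat - a.toNat) := by
  have ha : a.toNat ≤ l.length := by omega
  simp only [PySem.List.slice]
  rw [pvClamp _ _ h0, pvClamp _ _ (le_trans h0 hab), min_eq_left ha, min_eq_left hb]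

theorem pvMain_eq (line : String) (param_name : String) :
    extract_method_calls_py line param_name = extract_method_calls_py_alt line param_name := by
  simp only [extract_method_calls_py, extract_method_calls_py_alt]
  set l := line.toList with hl
  set pat := param_name.toList ++ ['.'] with hpat
  have hps : pat ≠ [] := by rw [hpat]; simp
  rw [pvSplitOne l pat hps]
  by_cases hinf : pat <:+: l
  · have hin : PySem.Chars.isIn pat l = true := (PySem.Chars.isIn_iff_infix _ _).mpr hinf
    have hnn : 0 ≤ PySem.Chars.find l pat := (PySem.Chars.find_nonneg_iff _ _).mpr hinf
    obtain ⟨hpre, -⟩ := PySem.Chars.find_spec (s := l) (sub := pat) hnn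
    set i := PySem.Chars.find l pat with hi
    have hstartle : i.toNat + pat.length ≤ l.length := by
      have := hpre.length_le
      rw [List.length_drop] at this
      have hp1 : 1 ≤ pat.length := by rw [hpat]; simp
      omega
    set rest := l.drop (i.toNat + pat.length) with hrest
    set t := (rest.takeWhile pvKeep).length with ht
    have htle : t ≤ rest.length := by
      rw [ht]; simpa using (List.takeWhile_prefix (l := rest) (p := pvKeep)).length_le
    have hrestlen : rest.length = l.length - (i.toNat + pat.length) := by rw [hrest]; simp
    have hstartNat : (i + (pat.length : Int)).toNat = i.toNat + pat.length := by omega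
    have hscanE : pvScanEnd l (i + (pat.length : Int)).toNat = i.toNat + pat.length + t := by
      rw [hstartNat, pvScanEnd_eq, ← hrest, ← ht]
    have hmapped : PySem.Chars.replace (PySem.Chars.replace rest ['('] ['\n']) [' '] ['\n']
        = rest.map pvNorm := by
      rw [pvReplace_single, pvReplace_single, List.map_map]
      rfl
    have hhead := pvHead_split_norm rest
    rw [← hmapped] at hhead
    simp only [if_pos hinf, hin]
    rw [if_neg (by simp : ¬ (true = false)), if_neg (by simp : ¬ ([_, _] : List (List Char)).length = 1)]
    simp only [List.getD, List.getElem?_cons_succ, List.getElem?_cons_zero, Option.getD_some]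
    rw [hhead, hscanE]
    have hsliceA : PySem.List.slice l (some (i + (pat.length : Int)))
        (some ((i.toNat + pat.length + t : Nat) : Int)) = rest.take t := by
      rw [pvSliceAB l _ _ (by omega) (by omega) (by omega), hstartNat, ← hrest]
      congr 1; omega
    rw [hsliceA]
    have htake : rest.take t = rest.takeWhile pvKeep := by
      rw [ht, ← List.prefix_iff_eq_take.mp (List.takeWhile_prefix pvKeep)]
    by_cases ht0 : t = 0
    · have hngt : ¬ (((i.toNat + pat.length + t : Nat) : Int) > i + (pat.length : Int)) := by omega
      have hemp : rest.takeWhile pvKeep = [] := List.eq_nil_of_length_eq_zero (ht ▸ ht0)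
      rw [if_neg hngt, if_pos hemp]
    · have hgt : ((i.toNat + pat.length + t : Nat) : Int) > i + (pat.length : Int) := by omega
      have hne : ¬ rest.takeWhile pvKeep = [] := by
        intro h; apply ht0; rw [ht, h]; rfl
      rw [if_pos hgt, if_neg hne, htake]
      simp
  · have hin : PySem.Chars.isIn pat l = false := by
      rw [PySem.Chars.isIn_eq_false_iff]; exact hinf
    simp [hin, hinf]

-- ===== VERDICT (by name: the statement is the Claim_ definition above) =====
theorem extract_method_calls_py_spec : Claim_equal_extract_method_calls_py := by
  intro line param_name _
  exact pvMain_eq line param_name
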